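-- pv_equiv track=rewrite | github.com/Barlua12/CodePtitPy | Thu_Gon_day_so.py | shrink_array
-- ===== SOURCE A (Python) =====
-- def shrink_array(A):
--     while True:
--         found = False
--         for i in range(0, len(A)-1):
--             if (A[i] + A[i+1]) % 2 == 0:
--                 del A[i:i+2]
--                 found = True
--                 break
--         if not found:
--             return len(A)
-- ===== SOURCE B (Python) =====
-- def shrink_array(A):
--     stack = []
--     for x in A:
--         p = x % 2
--         if stack and stack[-1] == p:
--             stack.pop()
--         else:
--             stack.append(p)
--     return len(stack)
-- ===== Notes on version B (the rewrite author's own statement) =====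
-- stated objective: faster
-- what changed: Replaced repeated leftmost-pair deletion restarting from scratch with a single pass keeping a parity stack (push parity, pop when top matches); the stack size is the final length.
import Mathlib
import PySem

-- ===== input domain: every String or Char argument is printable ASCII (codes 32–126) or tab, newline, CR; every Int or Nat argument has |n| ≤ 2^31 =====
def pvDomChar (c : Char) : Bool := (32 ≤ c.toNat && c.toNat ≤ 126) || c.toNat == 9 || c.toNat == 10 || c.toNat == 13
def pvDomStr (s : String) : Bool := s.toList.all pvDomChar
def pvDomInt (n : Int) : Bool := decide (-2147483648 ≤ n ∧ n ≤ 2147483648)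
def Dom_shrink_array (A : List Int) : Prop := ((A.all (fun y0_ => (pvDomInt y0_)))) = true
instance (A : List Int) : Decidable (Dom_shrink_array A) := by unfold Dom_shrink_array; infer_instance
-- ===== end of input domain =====

-- B replaces A's restart-from-scratch leftmost pair deletion by one linear pass with a parity
-- stack (push parity, pop when the top matches); equal return value, but note A mutates its
-- argument in place (del A[i:i+2]) while B does not — the equivalence here is about the RETURN value.

-- ===== PORT A =====
-- one pass of A's inner `for i in range(0, len(A)-1)`: find the leftmost adjacent pair with
-- (A[i]+A[i+1]) % 2 == 0, delete it (`del A[i:i+2]`) and return the resulting list; none = no pair found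
def pvDelPair (A : List Int) : Option (List Int) :=
  match A with
  | [] => none
  | [_] => none
  | x :: y :: r =>
    if PySem.Int.mod (x + y) 2 = 0 then some r
    else (pvDelPair (y :: r)).map (fun r' => x :: r')

theorem pvDelPair_length : ∀ {A A' : List Int}, pvDelPair A = some A' → A'.length + 2 = A.length := by
  intro A
  induction A with
  | nil => intro A' h; simp [pvDelPair] at h
  | cons x t ih =>
    intro A' h
    match t with
    | [] => simp [pvDelPair] at h
    | y :: r =>
      simp only [pvDelPair] at h
      split at h
      · cases h; simp
      · simp only [Option.map_eq_some_iff] at h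
        obtain ⟨r', hr', rfl⟩ := h
        have := ih hr'
        simp at this ⊢
        omega

-- A's `while True` loop: delete the leftmost equal-parity pair until none remains, return len(A)
def shrink_array (A : List Int) : Int :=
  match h : pvDelPair A with
  | some A' => shrink_array A'
  | none => (A.length : Int)
termination_by A.length
decreasing_by have := pvDelPair_length h; omega

-- ===== PORT B =====
-- one step of B's loop: p = x % 2; pop if the stack top equals p, else push p
-- Python's x % 2 (positive literal divisor) is exactly Lean's Int `%` (emod):
-- PySem.Int.mod_eq_emod_of_pos; so `x % 2` here is the faithful port of `p = x % 2`
def pvStep (st : List Int) (x : Int) : List Int :=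
  match st with
  | t :: ts => if t = x % 2 then ts else x % 2 :: t :: ts
  | [] => [x % 2]

def shrink_array_alt (A : List Int) : Int :=
  ((A.foldl pvStep []).length : Int)

-- ===== PRECONDITION & SPEC =====
def Spec_shrink_array (A : List Int) (out : Int) : Prop := out = shrink_array_alt A
instance (A : List Int) (out : Int) : Decidable (Spec_shrink_array A out) := by unfold Spec_shrink_array; infer_instance

-- ===== CLAIM (what is proved, stated in full; the proofs are below) =====
def Claim_equal_shrink_array : Prop := ∀ (A : List Int), Dom_shrink_array A → Spec_shrink_array A (shrink_array A)

-- ===== LEMMAS AND PROOFS =====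

-- the stack never holds two equal adjacent entries
def pvAlt : List Int → Prop
  | [] => True
  | [_] => True
  | a :: b :: r => a ≠ b ∧ pvAlt (b :: r)

theorem pvAlt_tail : ∀ {a : Int} {l : List Int}, pvAlt (a :: l) → pvAlt l := by
  intro a l h
  match l with
  | [] => trivial
  | b :: r => exact h.2

-- pvStep only depends on x % 2
theorem pvStep_congr {x y : Int} (h : x % 2 = y % 2) (s : List Int) :
    pvStep s x = pvStep s y := by
  cases s <;> simp [pvStep, h]

-- on an alternating stack, pushing the same parity twice is the identity
theorem pvStep_step (s : List Int) (x : Int) (hs : pvAlt s) :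
    pvStep (pvStep s x) x = s := by
  match s with
  | [] => simp [pvStep]
  | [t] =>
    by_cases h : t = x % 2 <;> simp [pvStep, h]
  | t :: u :: us =>
    obtain ⟨hne, _⟩ := hs
    by_cases h : t = x % 2
    · have hu : ¬ u = x % 2 := fun e => hne (h.trans e.symm)
      simp [pvStep, h, hu]
    · simp [pvStep, h]

-- pvStep preserves the alternating invariant
theorem pvStep_alt (s : List Int) (x : Int) (hs : pvAlt s) :
    pvAlt (pvStep s x) := by
  match s with
  | [] => simp [pvStep, pvAlt]
  | t :: ts =>
    by_cases h : t = x % 2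
    · simpa [pvStep, h] using pvAlt_tail hs
    · simp only [pvStep, if_neg h, pvAlt]
      exact ⟨fun e => h e.symm, hs⟩

theorem parity_eq_of_sum {x y : Int} (h : PySem.Int.mod (x + y) 2 = 0) :
    x % 2 = y % 2 := by
  simp only [PySem.Int.mod_eq_emod_of_pos (by norm_num : (0:Int) < 2)] at h
  omega

-- deleting one equal-parity pair does not change the fold
theorem fold_pvDelPair : ∀ {A A' : List Int} (s : List Int), pvAlt s →
    pvDelPair A = some A' → A.foldl pvStep s = A'.foldl pvStep s := by
  intro A
  induction A with
  | nil => intro A' s _ h; simp [pvDelPair] at h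
  | cons x t ih =>
    intro A' s hs h
    match t with
    | [] => simp [pvDelPair] at h
    | y :: r =>
      simp only [pvDelPair] at h
      split at h
      · cases h
        rename_i hpar
        have hxy := parity_eq_of_sum hpar
        simp only [List.foldl_cons]
        rw [pvStep_congr hxy.symm (pvStep s x), pvStep_step s x hs]
      · simp only [Option.map_eq_some_iff] at h
        obtain ⟨r', hr', rfl⟩ := h
        simp only [List.foldl_cons]
        exact ih (pvStep s x) (pvStep_alt s x hs) hr'

-- when A has no adjacent equal-parity pair, the fold just pushes everything
theorem fold_of_none : ∀ (A : List Int) (s : List Int),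
    pvDelPair A = none →
    (∀ p, A.head? = some p → s.head? ≠ some (p % 2)) →
    (A.foldl pvStep s).length = s.length + A.length := by
  intro A
  induction A with
  | nil => intro s _ _; simp
  | cons x t ih =>
    intro s hn hh
    have hpush : pvStep s x = x % 2 :: s := by
      match s with
      | [] => simp [pvStep]
      | u :: us =>
        have := hh x rfl
        simp only [List.head?, ne_eq, Option.some.injEq] at this
        simp [pvStep, this]
    simp only [List.foldl_cons, hpush]
    match t with
    | [] => simp
    | y :: r =>
      simp only [pvDelPair] at hn
      split at hn
      · exact absurd hn (by simp)
      · rename_i hpar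
        have hrn : pvDelPair (y :: r) = none := by
          cases e : pvDelPair (y :: r) with
          | none => rfl
          | some v => rw [e] at hn; simp at hn
        have hxy : ¬ x % 2 = y % 2 := by
          intro e
          apply hpar
          simp only [PySem.Int.mod_eq_emod_of_pos (by norm_num : (0:Int) < 2)]
          omega
        have := ih (x % 2 :: s) hrn (by
          intro p hp
          simp only [List.head?, Option.some.injEq] at hp
          subst hp
          simp only [List.head?, ne_eq, Option.some.injEq]
          exact hxy)
        rw [this]
        simp
        omega

-- A's loop computes the length of the fold
theorem shrink_eq_fold : ∀ (A : List Int), shrink_array A = ((A.foldl pvStep []).length : Int) := by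
  intro A
  induction A using shrink_array.induct with
  | case1 A A' h ih =>
    rw [shrink_array, h]
    show shrink_array A' = ((A.foldl pvStep []).length : Int)
    rw [ih, fold_pvDelPair [] trivial h]
  | case2 A h =>
    rw [shrink_array, h]
    show (A.length : Int) = ((A.foldl pvStep []).length : Int)
    rw [fold_of_none A [] h (by intro p hp; simp)]
    all_goals simp

-- ===== VERDICT (by name: the statement is the Claim_ definition above) =====
theorem shrink_array_spec : Claim_equal_shrink_array := by
  intro A _
  unfold Spec_shrink_array shrink_array_alt
  exact shrink_eq_fold A
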